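-- pv_equiv track=rewrite | github.com/Cyb0nix/Projet_TG | A5_graphe.py | trouver_sommet_sans_predecesseur
-- ===== SOURCE A (Python) =====
-- def trouver_sommet_sans_predecesseur(matrice_copie):
--     for i in range(len(matrice_copie)):
--         for j in range(len(matrice_copie)):
--             # Si le sommet a un prédécesseur, passer au sommet suivant
--             if matrice_copie[j][i] != "*":
--                 break
--             else:
--                 # Si le sommet n'a pas de prédécesseur, le retourner
--                 if j == len(matrice_copie) - 1:
--                     return i
--     return None
-- ===== SOURCE B (Python) =====
-- def trouver_sommet_sans_predecesseur(matrice_copie):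
--     # Pass 1: build the set of vertices that have at least one predecessor.
--     avec_pred = set()
--     for row in matrice_copie:
--         for i, val in enumerate(row):
--             if val != "*":
--                 avec_pred.add(i)
--     # Pass 2: first vertex index with no predecessor, else None.
--     for i in range(len(matrice_copie)):
--         if i not in avec_pred:
--             return i
--     return None
-- ===== Notes on version B (the rewrite author's own statement) =====
-- stated objective: alternative
-- what changed: Replaces A's per-column scan with break/last-index logic by two passes: one pass over the rows building the set of vertices that have a predecessor, then a scan for the first index outside that set.
import Mathlib
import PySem

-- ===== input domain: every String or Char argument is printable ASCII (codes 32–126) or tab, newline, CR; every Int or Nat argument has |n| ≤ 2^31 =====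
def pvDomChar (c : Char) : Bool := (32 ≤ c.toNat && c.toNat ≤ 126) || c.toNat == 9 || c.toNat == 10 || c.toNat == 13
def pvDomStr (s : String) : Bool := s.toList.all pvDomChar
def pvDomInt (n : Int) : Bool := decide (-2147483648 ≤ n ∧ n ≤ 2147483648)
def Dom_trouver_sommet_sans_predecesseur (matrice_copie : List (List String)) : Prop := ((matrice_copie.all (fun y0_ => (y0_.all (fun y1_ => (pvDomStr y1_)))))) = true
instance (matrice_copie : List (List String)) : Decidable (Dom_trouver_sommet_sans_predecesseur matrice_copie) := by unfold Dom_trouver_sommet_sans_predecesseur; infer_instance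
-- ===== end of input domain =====

-- B replaces A's per-column break/last-index scan by building the set of vertices with a
-- predecessor in one pass and then scanning for the first index outside it (objective: alternative).

-- ===== PORT A =====
-- matrice_copie[j][i]; none exactly where Python raises IndexError (excluded by Pre_)
def pvCellA (m : List (List String)) (j i : Int) : Option String :=
  (PySem.List.pyGet? m j).bind (fun row => PySem.List.pyGet? row i)

-- inner 'for j in range(len(matrice_copie))' loop of A; none = fell out via break.
-- (A 'none' cell — Python's IndexError — is treated as a break here; Pre_ excludes those inputs.)
def pvInnerA (m : List (List String)) (i : Int) : List Int → Option Int
  | [] => none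
  | j :: js =>
    if pvCellA m j i ≠ some "*" then none
    else if j = (m.length : Int) - 1 then some i
    else pvInnerA m i js

-- outer 'for i in range(len(matrice_copie))' loop of A
def pvOuterA (m : List (List String)) : List Int → Option Int
  | [] => none
  | i :: is' =>
    match pvInnerA m i (PySem.List.pyRange 0 (m.length : Int) 1) with
    | some r => some r
    | none => pvOuterA m is'

def trouver_sommet_sans_predecesseur (matrice_copie : List (List String)) : Option Int :=
  pvOuterA matrice_copie (PySem.List.pyRange 0 (matrice_copie.length : Int) 1)

-- ===== PORT B =====
-- 'for i, val in enumerate(row): if val != "*": avec_pred.add(i)'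
def pvMarkRow (s : PySem.Set Int) (row : List String) : PySem.Set Int :=
  (PySem.List.enumerate row 0).foldl
    (fun s p => if p.2 ≠ "*" then PySem.Set.add s p.1 else s) s

-- the set avec_pred after the first pass
def pvAvecPred (m : List (List String)) : PySem.Set Int :=
  m.foldl pvMarkRow PySem.Set.empty

-- 'for i in range(len(matrice_copie)): if i not in avec_pred: return i'
def pvScanB (s : PySem.Set Int) : List Int → Option Int
  | [] => none
  | i :: is' => if ¬ PySem.Set.contains s i then some i else pvScanB s is'

def trouver_sommet_sans_predecesseur_alt (matrice_copie : List (List String)) : Option Int :=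
  pvScanB (pvAvecPred matrice_copie) (PySem.List.pyRange 0 (matrice_copie.length : Int) 1)

-- ===== PRECONDITION & SPEC =====
-- matrice_copie[j][i], Nat indices (used only by Pre_)
def pvCell (m : List (List String)) (j i : Nat) : Option String :=
  m[j]?.bind (fun row => row[i]?)

-- column i is all "*" over j < len(m) (A returns i when it reaches this column)
def pvColRet (m : List (List String)) (i : Nat) : Bool :=
  (List.range m.length).all (fun j => pvCell m j i == some "*")

-- column i has a first non-"*" cell that is in range (A breaks at it without raising)
def pvColBrk (m : List (List String)) (i : Nat) : Bool :=
  (List.range m.length).any (fun j =>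
    ((List.range j).all (fun j' => pvCell m j' i == some "*"))
      && (pvCell m j i).isSome && (pvCell m j i != some "*"))

-- Pre_ holds exactly when A raises no IndexError: every column the scan reaches (all earlier
-- columns broke) either is all-"*" (A returns) or breaks at an in-range non-"*" cell.
def Pre_trouver_sommet_sans_predecesseur (matrice_copie : List (List String)) : Prop :=
  ∀ i, i < matrice_copie.length →
    (∀ i', i' < i → pvColBrk matrice_copie i' = true) →
    (pvColRet matrice_copie i = true ∨ pvColBrk matrice_copie i = true)

instance (matrice_copie : List (List String)) : Decidable (Pre_trouver_sommet_sans_predecesseur matrice_copie) := by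
  unfold Pre_trouver_sommet_sans_predecesseur; infer_instance

def pvWitness_trouver_sommet_sans_predecesseur : List (List String) := [["*", "a"], ["*", "*"]]

def Spec_trouver_sommet_sans_predecesseur (matrice_copie : List (List String)) (out : Option Int) : Prop := out = trouver_sommet_sans_predecesseur_alt matrice_copie
instance (matrice_copie : List (List String)) (out : Option Int) : Decidable (Spec_trouver_sommet_sans_predecesseur matrice_copie out) := by unfold Spec_trouver_sommet_sans_predecesseur; infer_instance

-- ===== CLAIM (what is proved, stated in full; the proofs are below) =====
def Claim_equal_trouver_sommet_sans_predecesseur : Prop := ∀ (matrice_copie : List (List String)), Dom_trouver_sommet_sans_predecesseur matrice_copie → Pre_trouver_sommet_sans_predecesseur matrice_copie → Spec_trouver_sommet_sans_predecesseur matrice_copie (trouver_sommet_sans_predecesseur matrice_copie)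

-- ===== LEMMAS AND PROOFS =====

theorem pvCellA_natCast (m : List (List String)) (j i : Nat) :
    pvCellA m (j : Int) (i : Int) = pvCell m j i := by
  simp [pvCellA, pvCell, PySem.List.pyGet?_natCast]

theorem pvColRet_iff (m : List (List String)) (i : Nat) :
    pvColRet m i = true ↔ ∀ j, j < m.length → pvCell m j i = some "*" := by
  simp [pvColRet, List.all_eq_true, List.mem_range]

theorem pvColBrk_iff (m : List (List String)) (i : Nat) :
    pvColBrk m i = true ↔
      ∃ j, j < m.length ∧ (∀ j', j' < j → pvCell m j' i = some "*") ∧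
        (pvCell m j i).isSome ∧ pvCell m j i ≠ some "*" := by
  simp only [pvColBrk, List.any_eq_true, List.all_eq_true, List.mem_range,
    Bool.and_eq_true, beq_iff_eq, bne_iff_ne, ne_eq]
  tauto

theorem pvInnerA_ret (m : List (List String)) (i : Nat) :
    ∀ (k b : Nat), m.length - b = k → b < m.length →
    (∀ j, b ≤ j → j < m.length → pvCell m j i = some "*") →
    pvInnerA m (i : Int) (PySem.List.pyRange (b : Int) (m.length : Int) 1) = some (i : Int) := by
  intro k
  induction k with
  | zero => intro b hk hb _; omega
  | succ k ih =>
    intro b hk hb hstar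
    rw [PySem.List.pyRange_one_cons (by exact_mod_cast hb)]
    have hc := hstar b le_rfl hb
    simp only [pvInnerA, pvCellA_natCast, hc, ne_eq, not_true_eq_false, if_false]
    by_cases hlast : b = m.length - 1
    · rw [if_pos (by omega)]
    · rw [if_neg (by omega)]
      have hcast : ((b : Int) + 1) = ((b + 1 : Nat) : Int) := by push_cast; ring
      rw [hcast]
      exact ih (b + 1) (by omega) (by omega) (fun j hj hj' => hstar j (by omega) hj')

theorem pvInnerA_brk (m : List (List String)) (i jb : Nat)
    (hjb : jb < m.length)
    (hpref : ∀ j', j' < jb → pvCell m j' i = some "*")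
    (hne : pvCell m jb i ≠ some "*") :
    ∀ (k b : Nat), jb - b = k → b ≤ jb →
    pvInnerA m (i : Int) (PySem.List.pyRange (b : Int) (m.length : Int) 1) = none := by
  intro k
  induction k with
  | zero =>
    intro b hk hb
    have hbe : b = jb := by omega
    subst hbe
    rw [PySem.List.pyRange_one_cons (by exact_mod_cast hjb)]
    simp only [pvInnerA, pvCellA_natCast]
    rw [if_pos hne]
  | succ k ih =>
    intro b hk hb
    have hbjb : b < jb := by omega
    have hbn : b < m.length := by omega
    rw [PySem.List.pyRange_one_cons (by exact_mod_cast hbn)]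
    simp only [pvInnerA, pvCellA_natCast]
    rw [if_neg (by simp [hpref b hbjb]), if_neg (by omega)]
    have hcast : ((b : Int) + 1) = ((b + 1 : Nat) : Int) := by push_cast; ring
    rw [hcast]
    exact ih (b + 1) (by omega) (by omega)

theorem pvMem_markRow_aux (row : List String) :
    ∀ (t : Int) (s : PySem.Set Int) (x : Int),
    (x ∈ (PySem.List.enumerate row t).foldl
        (fun s p => if p.2 ≠ "*" then PySem.Set.add s p.1 else s) s) ↔
    x ∈ s ∨ ∃ k : Nat, ∃ v, row[k]? = some v ∧ v ≠ "*" ∧ t + (k : Int) = x := by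
  induction row with
  | nil => intro t s x; simp [PySem.List.enumerate_nil]
  | cons r rest ih =>
    intro t s x
    rw [PySem.List.enumerate_cons]
    simp only [List.foldl_cons]
    rw [ih (t + 1)]
    constructor
    · rintro (hx | ⟨k, v, hk, hv, ht⟩)
      · by_cases hr : r = "*"
        · simp only [hr, ne_eq, not_true_eq_false, if_false] at hx
          exact Or.inl hx
        · simp only [ne_eq, hr, not_false_eq_true, if_true] at hx
          rcases (PySem.Set.mem_add s t x).mp hx with h | h
          · exact Or.inl h
          · exact Or.inr ⟨0, r, by simp, hr, by omega⟩
      · exact Or.inr ⟨k + 1, v, by simpa using hk, hv, by push_cast at ht ⊢; omega⟩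
    · rintro (hx | ⟨k, v, hk, hv, ht⟩)
      · refine Or.inl ?_
        split_ifs with hr
        · exact (PySem.Set.mem_add s t x).mpr (Or.inl hx)
        · exact hx
      · cases k with
        | zero =>
          simp only [List.getElem?_cons_zero, Option.some.injEq] at hk
          subst hk
          refine Or.inl ?_
          rw [if_pos hv]
          exact (PySem.Set.mem_add s t x).mpr (Or.inr (by push_cast at ht; omega))
        | succ k =>
          exact Or.inr ⟨k, v, by simpa using hk, hv, by push_cast at ht ⊢; omega⟩

theorem pvMem_avecPred_aux (rows : List (List String)) :
    ∀ (s : PySem.Set Int) (x : Int),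
    (x ∈ rows.foldl pvMarkRow s) ↔
    x ∈ s ∨ ∃ row ∈ rows, ∃ k : Nat, ∃ v, row[k]? = some v ∧ v ≠ "*" ∧ (k : Int) = x := by
  induction rows with
  | nil => intro s x; simp
  | cons row rest ih =>
    intro s x
    simp only [List.foldl_cons]
    rw [ih]
    have hrow : (x ∈ pvMarkRow s row) ↔
        x ∈ s ∨ ∃ k : Nat, ∃ v, row[k]? = some v ∧ v ≠ "*" ∧ (k : Int) = x := by
      unfold pvMarkRow
      rw [pvMem_markRow_aux row 0 s x]
      simp
    rw [hrow]
    constructor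
    · rintro ((hx | ⟨k, v, hk, hv, hkx⟩) | ⟨row', hrow', k, v, hk, hv, hkx⟩)
      · exact Or.inl hx
      · exact Or.inr ⟨row, List.mem_cons_self, k, v, hk, hv, hkx⟩
      · exact Or.inr ⟨row', List.mem_cons_of_mem _ hrow', k, v, hk, hv, hkx⟩
    · rintro (hx | ⟨row', hrow', k, v, hk, hv, hkx⟩)
      · exact Or.inl (Or.inl hx)
      · rcases List.mem_cons.mp hrow' with h | h
        · subst h; exact Or.inl (Or.inr ⟨k, v, hk, hv, hkx⟩)
        · exact Or.inr ⟨row', h, k, v, hk, hv, hkx⟩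

theorem pvMem_avecPred (m : List (List String)) (i : Nat) :
    ((i : Int) ∈ pvAvecPred m) ↔
    ∃ j, j < m.length ∧ (pvCell m j i).isSome ∧ pvCell m j i ≠ some "*" := by
  unfold pvAvecPred
  rw [pvMem_avecPred_aux]
  simp only [PySem.Set.empty]
  constructor
  · rintro (hx | ⟨row, hrow, k, v, hk, hv, hkx⟩)
    · simp at hx
    · have hki : k = i := by exact_mod_cast hkx
      subst hki
      rcases List.mem_iff_getElem.mp hrow with ⟨j, hj, hrj⟩
      refine ⟨j, hj, ?_, ?_⟩
      · simp [pvCell, List.getElem?_eq_getElem hj, hrj, hk]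
      · simp [pvCell, List.getElem?_eq_getElem hj, hrj, hk]
        exact hv
  · rintro ⟨j, hj, hsome, hne⟩
    rcases Option.isSome_iff_exists.mp hsome with ⟨v, hv⟩
    have hcell : pvCell m j i = m[j][i]? := by
      simp [pvCell, List.getElem?_eq_getElem hj]
    refine Or.inr ⟨m[j], List.getElem_mem hj, i, v, ?_, ?_, rfl⟩
    · rw [← hcell]; exact hv
    · intro hveq
      apply hne
      rw [hv, hveq]

theorem pvMain (m : List (List String)) (hpre : Pre_trouver_sommet_sans_predecesseur m) :
    ∀ (k b : Nat), m.length - b = k →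
    (∀ i', i' < b → pvColBrk m i' = true) →
    pvOuterA m (PySem.List.pyRange (b : Int) (m.length : Int) 1) =
      pvScanB (pvAvecPred m) (PySem.List.pyRange (b : Int) (m.length : Int) 1) := by
  intro k
  induction k with
  | zero =>
    intro b hk _
    rw [PySem.List.pyRange_one_eq_nil (by omega)]
    rfl
  | succ k ih =>
    intro b hk hbrk
    have hb : b < m.length := by omega
    rw [PySem.List.pyRange_one_cons (by exact_mod_cast hb)]
    rcases hpre b hb hbrk with hret | hbrkb
    · have hstar := (pvColRet_iff m b).mp hret
      have hinner := pvInnerA_ret m b m.length 0 (by omega) (by omega)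
        (fun j _ hj => hstar j hj)
      simp only [Nat.cast_zero] at hinner
      have hnotmem : ¬ ((b : Int) ∈ pvAvecPred m) := by
        rw [pvMem_avecPred]
        rintro ⟨j, hj, _, hne⟩
        exact hne (hstar j hj)
      simp only [pvOuterA, pvScanB, hinner]
      rw [if_pos (fun h => hnotmem ((PySem.Set.contains_iff _ _).mp h))]
    · rcases (pvColBrk_iff m b).mp hbrkb with ⟨jb, hjb, hpref, hsome, hne⟩
      have hinner := pvInnerA_brk m b jb hjb hpref hne jb 0 (by omega) (by omega)
      simp only [Nat.cast_zero] at hinner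
      have hmem : ((b : Int) ∈ pvAvecPred m) := (pvMem_avecPred m b).mpr ⟨jb, hjb, hsome, hne⟩
      simp only [pvOuterA, pvScanB, hinner]
      rw [if_neg (by simpa using hmem)]
      have hcast : ((b : Int) + 1) = ((b + 1 : Nat) : Int) := by push_cast; ring
      rw [hcast]
      refine ih (b + 1) (by omega) (fun i' hi' => ?_)
      rcases Nat.lt_succ_iff_lt_or_eq.mp hi' with h | h
      · exact hbrk i' h
      · subst h; exact hbrkb

-- ===== VERDICT (by name: the statement is the Claim_ definition above) =====
theorem trouver_sommet_sans_predecesseur_spec : Claim_equal_trouver_sommet_sans_predecesseur := by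
  unfold Claim_equal_trouver_sommet_sans_predecesseur
  intro m _ hpre
  unfold Spec_trouver_sommet_sans_predecesseur
  have h := pvMain m hpre m.length 0 rfl (fun i' h => absurd h (Nat.not_lt_zero _))
  simp only [Nat.cast_zero] at h
  simpa [trouver_sommet_sans_predecesseur, trouver_sommet_sans_predecesseur_alt] using h
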